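-- pv_equiv track=rewrite | github.com/ZqtCtios/RecommenderSystem | find_useful_website.py | find_weblcs
-- ===== SOURCE A (Python) =====
-- def find_weblcs(s1, s2):
--     """[find_weblcs]
--
--     [找到两个网址之间的最长公共部分]
--
--     Arguments:
--         s1 {[str]} -- [网址一]
--         s2 {[str]} -- [网址二]
--
--     Returns:
--         [str] -- [最长公共部分]
--     """
--     s1 = s1[::-1]
--     s2 = s2[::-1]
--     length = min(len(s1), len(s2))
--     x = 0
--     y = 0
--     for i in range(length):
--         if s1[i] != s2[i]:
--             break
--         if s1[i] == '.':
--             y += 1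
--             if y == 3:
--                 x += 1
--                 break
--         x += 1
--     if x == 0:
--         return ""
--     else:
--         return s1[0:x][::-1]
-- ===== SOURCE B (Python) =====
-- def find_weblcs(s1, s2):
--     r1, r2 = s1[::-1], s2[::-1]
--     # pass 1: matched prefix of the reversals (= reversed longest common suffix)
--     m = []
--     for c, d in zip(r1, r2):
--         if c != d:
--             break
--         m.append(c)
--     # pass 2: cut just after the 3rd dot (counted from the end of the originals)
--     out = []
--     dots = 0
--     for c in m:
--         out.append(c)
--         if c == '.':
--             dots += 1
--             if dots == 3:
--                 break
--     return ''.join(reversed(out))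
-- ===== Notes on version B (the rewrite author's own statement) =====
-- stated objective: simpler
-- what changed: Replaces A's single interleaved mismatch-and-dot-counting loop with two separate passes: first compute the longest common suffix (matched prefix of the reversals), then cut that region just after the 3rd dot.
import Mathlib
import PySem

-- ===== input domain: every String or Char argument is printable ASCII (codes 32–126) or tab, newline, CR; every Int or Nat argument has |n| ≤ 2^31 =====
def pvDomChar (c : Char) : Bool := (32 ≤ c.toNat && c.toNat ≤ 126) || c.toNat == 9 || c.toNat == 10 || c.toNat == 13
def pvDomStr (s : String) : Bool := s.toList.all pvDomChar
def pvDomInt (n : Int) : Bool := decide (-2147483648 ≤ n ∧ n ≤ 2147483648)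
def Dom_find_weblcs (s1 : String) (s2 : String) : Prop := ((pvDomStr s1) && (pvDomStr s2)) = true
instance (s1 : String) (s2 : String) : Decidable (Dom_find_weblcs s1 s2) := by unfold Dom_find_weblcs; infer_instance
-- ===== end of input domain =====

-- B computes the result in two separate passes (common suffix, then the 3-dot cut) instead of A's
-- single interleaved loop; same cost, simpler decomposition.

-- ===== PORT A =====
-- A's for-loop over range(length) with break, state (x, y); exact transliteration.
def pvLoopA (r1 r2 : List Char) (len : Nat) (i x y : Nat) : Nat :=
  if _h : i < len then
    let c1 := r1.getD i ' '
    let c2 := r2.getD i ' '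
    if c1 ≠ c2 then x
    else if c1 = '.' then
      (if y + 1 = 3 then x + 1 else pvLoopA r1 r2 len (i+1) (x+1) (y+1))
    else pvLoopA r1 r2 len (i+1) (x+1) y
  else x
termination_by len - i

def find_weblcs (s1 : String) (s2 : String) : String :=
  let r1 := s1.toList.reverse
  let r2 := s2.toList.reverse
  let len := min r1.length r2.length
  let x := pvLoopA r1 r2 len 0 0 0
  if x = 0 then "" else String.mk ((r1.take x).reverse)

-- ===== PORT B =====
-- pass 1 of Source B: matched prefix of the two reversals
def pvMatchPref : List Char → List Char → List Char
  | a :: as, b :: bs => if a ≠ b then [] else a :: pvMatchPref as bs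
  | _, _ => []

-- pass 2 of Source B: keep characters until just after the 3rd dot
def pvCut3 (dots : Nat) : List Char → List Char
  | [] => []
  | c :: cs =>
    if c = '.' then (if dots + 1 = 3 then [c] else c :: pvCut3 (dots+1) cs)
    else c :: pvCut3 dots cs

def find_weblcs_alt (s1 : String) (s2 : String) : String :=
  String.mk ((pvCut3 0 (pvMatchPref s1.toList.reverse s2.toList.reverse)).reverse)

-- ===== PRECONDITION & SPEC =====
def Spec_find_weblcs (s1 : String) (s2 : String) (out : String) : Prop := out = find_weblcs_alt s1 s2
instance (s1 : String) (s2 : String) (out : String) : Decidable (Spec_find_weblcs s1 s2 out) := by unfold Spec_find_weblcs; infer_instance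

-- ===== CLAIM (what is proved, stated in full; the proofs are below) =====
def Claim_equal_find_weblcs : Prop := ∀ (s1 : String) (s2 : String), Dom_find_weblcs s1 s2 → Spec_find_weblcs s1 s2 (find_weblcs s1 s2)

-- ===== LEMMAS AND PROOFS =====

theorem pvMatchPref_nil_right (a : List Char) : pvMatchPref a [] = [] := by
  cases a <;> simp [pvMatchPref]

theorem pvMatchPref_prefix : ∀ (a b : List Char), pvMatchPref a b <+: a := by
  intro a
  induction a with
  | nil => intro b; cases b <;> simp [pvMatchPref]
  | cons x xs ih =>
    intro b
    cases b with
    | nil => simp [pvMatchPref]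
    | cons y ys =>
      by_cases h : x = y <;> simp [pvMatchPref, h]
      exact ih ys

theorem pvCut3_prefix : ∀ (d : Nat) (l : List Char), pvCut3 d l <+: l := by
  intro d l
  induction l generalizing d with
  | nil => simp [pvCut3]
  | cons c cs ih =>
    by_cases h : c = '.'
    · by_cases h3 : d + 1 = 3 <;> simp [pvCut3, h, h3]
      exact ih (d+1)
    · simp [pvCut3, h]; exact ih d

-- the interleaved loop of A computes exactly x + |cut of the remaining matched region|
theorem pvLoopA_spec : ∀ (r1 r2 : List Char) (i x y : Nat),
    pvLoopA r1 r2 (min r1.length r2.length) i x y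
      = x + (pvCut3 y (pvMatchPref (r1.drop i) (r2.drop i))).length := by
  intro r1 r2 i x y
  by_cases h : i < min r1.length r2.length
  · have h1 : i < r1.length := lt_of_lt_of_le h (min_le_left _ _)
    have h2 : i < r2.length := lt_of_lt_of_le h (min_le_right _ _)
    rw [pvLoopA, dif_pos h]
    have g1 : r1.getD i ' ' = r1[i] := List.getD_eq_getElem r1 ' ' h1
    have g2 : r2.getD i ' ' = r2[i] := List.getD_eq_getElem r2 ' ' h2
    rw [List.drop_eq_getElem_cons h1, List.drop_eq_getElem_cons h2]
    simp only [g1, g2, pvMatchPref]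
    by_cases hne : r1[i] = r2[i]
    · simp only [hne, ne_eq, not_true_eq_false, if_false, ite_false]
      by_cases hdot : r2[i] = '.'
      · by_cases h3 : y + 1 = 3
        · simp [hdot, h3, pvCut3]
        · rw [if_pos hdot, if_neg h3, pvLoopA_spec r1 r2 (i+1) (x+1) (y+1)]
          simp [pvCut3, hdot, h3]; omega
      · rw [if_neg hdot, pvLoopA_spec r1 r2 (i+1) (x+1) y]
        simp [pvCut3, hdot]; omega
    · simp [hne, pvCut3]
  · rw [pvLoopA, dif_neg h]
    have : r1.drop i = [] ∨ r2.drop i = [] := by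
      rcases (by omega : r1.length ≤ i ∨ r2.length ≤ i) with h' | h'
      · left; exact List.drop_eq_nil_of_le h'
      · right; exact List.drop_eq_nil_of_le h'
    rcases this with h' | h' <;> simp [h', pvMatchPref_nil_right, pvMatchPref, pvCut3]
termination_by r1 r2 i => min r1.length r2.length - i

-- ===== VERDICT (by name: the statement is the Claim_ definition above) =====
theorem find_weblcs_spec : Claim_equal_find_weblcs := by
  intro s1 s2 _
  unfold Spec_find_weblcs find_weblcs find_weblcs_alt
  set r1 := s1.toList.reverse with hr1
  set r2 := s2.toList.reverse with hr2
  have hx := pvLoopA_spec r1 r2 0 0 0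
  simp only [List.drop_zero, Nat.zero_add] at hx
  set C := pvCut3 0 (pvMatchPref r1 r2) with hC
  have hpre : C <+: r1 := (pvCut3_prefix 0 _).trans (pvMatchPref_prefix r1 r2)
  have htake : r1.take C.length = C := (List.prefix_iff_eq_take.mp hpre).symm
  by_cases h0 : pvLoopA r1 r2 (min r1.length r2.length) 0 0 0 = 0
  · rw [if_pos h0]
    have : C = [] := List.eq_nil_of_length_eq_zero (by omega)
    rw [this]; rfl
  · rw [if_neg h0, hx, htake]
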